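-- pv_equiv track=rewrite | github.com/YusufAsim/BBM103 | number_board_game/assignment3.py | shifting_down
-- ===== SOURCE A (Python) =====
-- def column_list_maker(matrix):
--     """This function creates the matrix of columns by using the current matrix """
--     column_list = [[row[i]for row in matrix] for i in  range(len(matrix[0]))]
--     return column_list
--
-- def shifting_down(matrix):
--     """This function shifts the values down if there is a blank value between value number on board
--     and returns the shifted version of matrix."""
--     column_list = column_list_maker(matrix)
--     for column in column_list:
--         blank_list = []
--         valid_list = []
--         for i in column:
--             if i == ' ':
--                 blank_list.append(i)
--             else:
--                 valid_list.append(i)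
--         column.clear()  # to start ordering
--         column.extend(blank_list)  # firstly blanks to put numbers down
--         column.extend(valid_list)  # then numbers
--     temp_matrix = [[column[i] for column in column_list]for i in range(len(matrix))]
--     return temp_matrix
-- ===== SOURCE B (Python) =====
-- def shifting_down(matrix):
--     """Gravity-shift each column: blanks float up, values sink, via direct
--     indexed placement into a fresh blank grid (no transposes, no mutation
--     of the input)."""
--     rows = len(matrix)
--     cols = len(matrix[0])
--     out = [[' '] * cols for _ in range(rows)]
--     for j in range(cols):
--         vals = [row[j] for row in matrix if row[j] != ' ']
--         i = rows - len(vals)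
--         for v in vals:
--             out[i][j] = v
--             i += 1
--     return out
-- ===== Notes on version B (the rewrite author's own statement) =====
-- stated objective: alternative
-- what changed: Instead of transposing to columns, partitioning each column into blank/value accumulator lists, rebuilding the column in place and transposing back, B allocates a blank result grid once and writes each column's non-blank values directly into its bottom rows by index, with no transposes and no mutation of the input.
import Mathlib
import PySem

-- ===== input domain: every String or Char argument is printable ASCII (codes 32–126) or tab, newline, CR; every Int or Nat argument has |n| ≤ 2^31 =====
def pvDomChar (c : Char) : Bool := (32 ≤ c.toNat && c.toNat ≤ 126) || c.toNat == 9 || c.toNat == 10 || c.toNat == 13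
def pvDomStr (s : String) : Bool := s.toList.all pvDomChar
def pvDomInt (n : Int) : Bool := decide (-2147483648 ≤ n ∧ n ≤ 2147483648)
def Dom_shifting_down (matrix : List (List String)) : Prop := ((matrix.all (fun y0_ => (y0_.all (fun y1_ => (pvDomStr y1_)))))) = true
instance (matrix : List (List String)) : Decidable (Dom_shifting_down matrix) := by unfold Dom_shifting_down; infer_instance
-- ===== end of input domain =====

-- B replaces A's transpose / partition-into-two-lists / rebuild / transpose-back with one
-- pass that writes each column's non-blank values directly into the bottom rows of a fresh
-- blank grid (objective: alternative decomposition, same cost; B does not mutate its input).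

-- ===== PORT A =====
def column_list_maker (matrix : List (List String)) : List (List String) :=
  (List.range (matrix.headD []).length).map (fun i => matrix.map (fun row => row.getD i ""))

def shifting_down (matrix : List (List String)) : List (List String) :=
  let column_list := column_list_maker matrix
  let column_list := column_list.map (fun column =>
    let p := column.foldl
      (fun (p : List String × List String) i =>
        if i = " " then (p.1 ++ [i], p.2) else (p.1, p.2 ++ [i]))
      ([], [])
    p.1 ++ p.2)
  (List.range matrix.length).map (fun i => column_list.map (fun column => column.getD i ""))

-- ===== PORT B =====
-- out[i][j] = v  (List.set leaves the grid unchanged out of range; inside Pre_ all writes are in range)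
def setCell (g : List (List String)) (r c : Nat) (v : String) : List (List String) :=
  g.set r ((g.getD r []).set c v)

def shifting_down_alt (matrix : List (List String)) : List (List String) :=
  let rows := matrix.length
  let cols := (matrix.headD []).length
  let out0 := List.replicate rows (List.replicate cols " ")
  (List.range cols).foldl
    (fun out j =>
      let vals := matrix.filterMap (fun row =>
        let x := row.getD j ""
        if x = " " then none else some x)
      (vals.foldl
        (fun (p : List (List String) × Nat) v => (setCell p.1 p.2 j v, p.2 + 1))
        (out, rows - vals.length)).1)
    out0

-- ===== PRECONDITION & SPEC =====
-- Pre_ excludes exactly the inputs where the Python raises IndexError: the empty matrix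
-- (matrix[0]) and matrices with a row shorter than the first row (row[i]).
def Pre_shifting_down (matrix : List (List String)) : Prop :=
  matrix ≠ [] ∧ ∀ row ∈ matrix, (matrix.headD []).length ≤ row.length
instance (matrix : List (List String)) : Decidable (Pre_shifting_down matrix) := by
  unfold Pre_shifting_down; infer_instance

def pvWitness_shifting_down : List (List String) := [["1", " "], [" ", "2"]]

def Spec_shifting_down (matrix : List (List String)) (out : List (List String)) : Prop := out = shifting_down_alt matrix
instance (matrix : List (List String)) (out : List (List String)) : Decidable (Spec_shifting_down matrix out) := by unfold Spec_shifting_down; infer_instance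

-- ===== CLAIM (what is proved, stated in full; the proofs are below) =====
def Claim_equal_shifting_down : Prop := ∀ (matrix : List (List String)), Dom_shifting_down matrix → Pre_shifting_down matrix → Spec_shifting_down matrix (shifting_down matrix)

-- ===== LEMMAS AND PROOFS =====

-- the j-th column of the matrix, and its non-blank values in order
def pvCol (m : List (List String)) (j : Nat) : List String :=
  m.map (fun row => row.getD j "")
def pvVals (m : List (List String)) (j : Nat) : List String :=
  (pvCol m j).filter (fun x => !decide (x = " "))
-- a column after the shift: blanks on top, values at the bottom
def pvShifted (m : List (List String)) (j : Nat) : List String :=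
  List.replicate (m.length - (pvVals m j).length) " " ++ pvVals m j
-- the common pointwise description of the result
def pvTarget (m : List (List String)) : List (List String) :=
  (List.range m.length).map (fun i =>
    (List.range (m.headD []).length).map (fun j => (pvShifted m j).getD i ""))

theorem pv_foldA (col b v : List String) :
    col.foldl
      (fun (p : List String × List String) i =>
        if i = " " then (p.1 ++ [i], p.2) else (p.1, p.2 ++ [i]))
      (b, v)
    = (b ++ col.filter (fun x => decide (x = " ")), v ++ col.filter (fun x => !decide (x = " "))) := by
  induction col generalizing b v with
  | nil => simp
  | cons x xs ih =>
    by_cases h : x = " " <;>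
      simp [List.foldl_cons, h, ih, List.append_assoc]

theorem pv_partition_len (l : List String) :
    (l.filter (fun x => decide (x = " "))).length + (l.filter (fun x => !decide (x = " "))).length = l.length := by
  induction l with
  | nil => simp
  | cons x xs ih =>
    by_cases h : x = " " <;> simp [h] <;> omega

theorem pv_blanks_replicate (l : List String) :
    l.filter (fun x => decide (x = " ")) = List.replicate (l.filter (fun x => decide (x = " "))).length " " := by
  apply List.eq_replicate_of_mem
  intro b hb
  have := List.of_mem_filter hb
  simpa using this

theorem pv_shifted_col (m : List (List String)) (j : Nat) :
    (pvCol m j).filter (fun x => decide (x = " ")) ++ (pvCol m j).filter (fun x => !decide (x = " "))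
    = pvShifted m j := by
  have hlen := pv_partition_len (pvCol m j)
  have hcol : (pvCol m j).length = m.length := by simp [pvCol]
  have hv : (pvVals m j).length ≤ m.length := by
    have := List.length_filter_le (fun x => !decide (x = " ")) (pvCol m j)
    simp only [pvVals]; omega
  have hb : ((pvCol m j).filter (fun x => decide (x = " "))).length
      = m.length - (pvVals m j).length := by
    simp only [pvVals] at *; omega
  rw [pvShifted, ← hb, ← pv_blanks_replicate]
  rfl

theorem pv_A_eq_target (m : List (List String)) : shifting_down m = pvTarget m := by
  unfold shifting_down pvTarget column_list_maker
  simp only [pv_foldA, List.nil_append, List.map_map]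
  apply List.map_congr_left
  intro i _
  apply List.map_congr_left
  intro j _
  simp only [Function.comp]
  rw [show List.map (fun row => row.getD j "") m = pvCol m j from rfl, pv_shifted_col m j]

theorem pv_filterMap_vals (m : List (List String)) (j : Nat) :
    m.filterMap (fun row =>
        let x := row.getD j ""
        if x = " " then none else some x)
    = pvVals m j := by
  induction m with
  | nil => simp [pvVals, pvCol]
  | cons r rs ih =>
    by_cases h : r.getD j "" = " " <;>
      simp only [List.getD_eq_getElem?_getD] at h <;>
      simp [h, pvVals, pvCol] at ih ⊢ <;>
      exact ih

theorem pv_vals_le (m : List (List String)) (j : Nat) :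
    (pvVals m j).length ≤ m.length := by
  have := List.length_filter_le (fun x => !decide (x = " ")) (pvCol m j)
  simp only [pvVals]
  simpa [pvCol] using this

-- one column write: effect on the grid, row by row
theorem pv_rowWrite (j : Nat) (vals : List String) (s : Nat) (g : List (List String))
    (h : s + vals.length ≤ g.length) :
    (vals.foldl
      (fun (p : List (List String) × Nat) v => (setCell p.1 p.2 j v, p.2 + 1))
      (g, s)).1.length = g.length ∧
    ∀ r, r < g.length →
      (vals.foldl
        (fun (p : List (List String) × Nat) v => (setCell p.1 p.2 j v, p.2 + 1))
        (g, s)).1.getD r []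
      = if s ≤ r ∧ r < s + vals.length
          then (g.getD r []).set j (vals.getD (r - s) "")
          else g.getD r [] := by
  induction vals generalizing g s with
  | nil =>
    refine ⟨rfl, fun r hr => ?_⟩
    rw [List.foldl_nil, if_neg (by simp)]
  | cons v vs ih =>
    have hs : s < g.length := by simp at h; omega
    have hg1len : (setCell g s j v).length = g.length := by simp [setCell]
    have h1 : s + 1 + vs.length ≤ (setCell g s j v).length := by
      rw [hg1len]; simp at h; omega
    obtain ⟨ihlen, ihpt⟩ := ih (s + 1) (setCell g s j v) h1
    constructor
    · rw [List.foldl_cons]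
      exact ihlen.trans hg1len
    · intro r hr
      have hr1 : r < (setCell g s j v).length := by omega
      have hget1 : (setCell g s j v).getD r []
          = if s = r then (g.getD s []).set j v else g.getD r [] := by
        unfold setCell
        rcases eq_or_ne s r with rfl | hne
        · simp [List.getD_eq_getElem?_getD, hs]
        · simp [List.getD_eq_getElem?_getD, List.getElem?_set_ne hne, hne]
      rw [List.foldl_cons, ihpt r hr1]
      simp only [List.getD_eq_getElem?_getD] at hget1 ⊢
      rcases eq_or_ne s r with rfl | hne
      · rw [if_neg (by omega), hget1, if_pos rfl,
          if_pos (by simp only [List.length_cons]; omega), Nat.sub_self]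
        simp
      · rw [hget1, if_neg hne]
        by_cases hw : s + 1 ≤ r ∧ r < s + 1 + vs.length
        · rw [if_pos hw, if_pos (by simp only [List.length_cons]; omega)]
          have hsub : r - s = (r - (s + 1)) + 1 := by omega
          rw [hsub]
          simp
        · rw [if_neg hw, if_neg (by simp only [List.length_cons]; omega)]

theorem pv_set_map_range {α : Type} (w j : Nat) (f : Nat → α) (x : α) :
    ((List.range w).map f).set j x
    = (List.range w).map (fun c => if c = j then x else f c) := by
  apply List.ext_getElem
  · simp
  · intro i h1 h2
    simp only [List.getElem_set, List.getElem_map, List.getElem_range]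
    rcases eq_or_ne j i with rfl | hne
    · simp
    · simp [hne, Ne.symm hne]

-- grid state after processing the first jmax columns
theorem pv_colFold (m : List (List String)) (jmax : Nat) :
    ((List.range jmax).foldl
      (fun out j =>
        ((pvVals m j).foldl
          (fun (p : List (List String) × Nat) v => (setCell p.1 p.2 j v, p.2 + 1))
          (out, m.length - (pvVals m j).length)).1)
      (List.replicate m.length (List.replicate (m.headD []).length " "))).length
      = m.length ∧
    ∀ r, r < m.length →
      ((List.range jmax).foldl
        (fun out j =>
          ((pvVals m j).foldl
            (fun (p : List (List String) × Nat) v => (setCell p.1 p.2 j v, p.2 + 1))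
            (out, m.length - (pvVals m j).length)).1)
        (List.replicate m.length (List.replicate (m.headD []).length " "))).getD r []
      = (List.range (m.headD []).length).map
          (fun c => if c < jmax then (pvShifted m c).getD r "" else " ") := by
  induction jmax with
  | zero =>
    refine ⟨by simp, fun r hr => ?_⟩
    rw [List.range_zero, List.foldl_nil,
      show (List.replicate m.length (List.replicate (m.headD []).length " ")).getD r []
          = List.replicate (m.headD []).length " " from by
        simp [List.getD_eq_getElem?_getD, hr]]
    simp [List.map_const']
  | succ j ih =>
    rw [List.range_succ, List.foldl_append, List.foldl_cons, List.foldl_nil]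
    set G := (List.range j).foldl
      (fun out j =>
        ((pvVals m j).foldl
          (fun (p : List (List String) × Nat) v => (setCell p.1 p.2 j v, p.2 + 1))
          (out, m.length - (pvVals m j).length)).1)
      (List.replicate m.length (List.replicate (m.headD []).length " ")) with hG
    obtain ⟨ihlen, ihpt⟩ := ih
    have hv := pv_vals_le m j
    have hbound : (m.length - (pvVals m j).length) + (pvVals m j).length ≤ G.length := by
      rw [ihlen]; omega
    obtain ⟨wlen, wpt⟩ := pv_rowWrite j (pvVals m j) (m.length - (pvVals m j).length) G hbound
    refine ⟨by rw [wlen, ihlen], fun r hr => ?_⟩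
    have hrG : r < G.length := by rw [ihlen]; exact hr
    rw [wpt r hrG, ihpt r hr]
    by_cases hwin : m.length - (pvVals m j).length ≤ r
        ∧ r < m.length - (pvVals m j).length + (pvVals m j).length
    · rw [if_pos hwin, pv_set_map_range]
      apply List.map_congr_left
      intro c hc
      simp only [List.mem_range] at hc
      rcases eq_or_ne c j with rfl | hne
      · rw [if_pos rfl, if_pos (by omega)]
        simp only [pvShifted, List.getD_eq_getElem?_getD]
        rw [List.getElem?_append_right (by simpa using hwin.1)]
        simp
      · rw [if_neg hne]
        by_cases hcj : c < j
        · rw [if_pos hcj, if_pos (by omega)]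
        · rw [if_neg hcj, if_neg (by omega)]
    · rw [if_neg hwin]
      apply List.map_congr_left
      intro c hc
      simp only [List.mem_range] at hc
      rcases eq_or_ne c j with rfl | hne
      · have hrs : r < m.length - (pvVals m c).length := by omega
        rw [if_neg (Nat.lt_irrefl c), if_pos (by omega)]
        simp only [pvShifted, List.getD_eq_getElem?_getD]
        rw [List.getElem?_append_left (by simpa using hrs)]
        simp [hrs]
      · by_cases hcj : c < j
        · rw [if_pos hcj, if_pos (by omega)]
        · rw [if_neg hcj, if_neg (by omega)]

theorem pv_B_eq_target (m : List (List String)) : shifting_down_alt m = pvTarget m := by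
  obtain ⟨hlen, hpt⟩ := pv_colFold m (m.headD []).length
  have hB : shifting_down_alt m
      = (List.range (m.headD []).length).foldl
          (fun out j =>
            ((pvVals m j).foldl
              (fun (p : List (List String) × Nat) v => (setCell p.1 p.2 j v, p.2 + 1))
              (out, m.length - (pvVals m j).length)).1)
          (List.replicate m.length (List.replicate (m.headD []).length " ")) := by
    unfold shifting_down_alt
    simp only [pv_filterMap_vals]
  rw [hB]
  apply List.ext_getElem
  · rw [hlen]; simp [pvTarget]
  · intro i h1 h2
    have hi : i < m.length := by rw [hlen] at h1; exact h1
    have hget : ∀ (L : List (List String)) (hL : i < L.length), L[i] = L.getD i [] :=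
      fun L hL => by simp [List.getD_eq_getElem?_getD, List.getElem?_eq_getElem hL]
    rw [hget _ h1, hget _ h2, hpt i hi]
    have htg : (pvTarget m).getD i []
        = (List.range (m.headD []).length).map (fun j => (pvShifted m j).getD i "") := by
      simp [pvTarget, List.getD_eq_getElem?_getD, hi]
    rw [htg]
    apply List.map_congr_left
    intro c hc
    simp only [List.mem_range] at hc
    rw [if_pos hc]

-- ===== VERDICT (by name: the statement is the Claim_ definition above) =====
theorem shifting_down_spec : Claim_equal_shifting_down := by
  intro m _ _
  unfold Spec_shifting_down
  rw [pv_A_eq_target, pv_B_eq_target]
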